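-- pv_equiv track=rewrite | github.com/openharmony/build | ohos/packages/rules/categorized_libraries_utils.py | __get_relative_install_dir
-- ===== SOURCE A (Python) =====
-- def __get_relative_install_dir(categories):
--     is_platforsdk = False
--     is_chipsetsdk = False
--     is_chipsetsdk_sp = False
--     is_llndk = False
--     is_ndk = False
--     is_passthrough = False
--     is_passthrough_indirect = False
--     for cat in categories:
--         if cat.startswith("platformsdk"):
--             is_platforsdk = True
--         elif cat.startswith("chipsetsdk"):
--             if cat.startswith("chipsetsdk_sp"):
--                 is_chipsetsdk_sp = True
--             else:
--                 is_chipsetsdk = True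
--         elif cat.startswith("passthrough"):
--             if cat.startswith("passthrought_indirect"):
--                 is_passthrough_indirect = True
--             else:
--                 is_passthrough = True
--         if cat == "ndk":
--             is_ndk = True
--         if cat == "llndk":
--             is_llndk = True
--     if is_llndk:
--         return "llndk"
--     if is_ndk:
--         return "ndk"
--     if is_chipsetsdk_sp:
--         return "chipset-sdk-sp"
--     if is_chipsetsdk:
--         return "chipset-sdk"
--     if is_passthrough:
--         return "passthrough"
--     if is_passthrough_indirect:
--         return "passthrough/indirect"
--     if is_platforsdk:
--         return "platformsdk"
--     return ""
-- ===== SOURCE B (Python) =====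
-- def __get_relative_install_dir(categories):
--     rules = [
--         (lambda c: c == "llndk", "llndk"),
--         (lambda c: c == "ndk", "ndk"),
--         (lambda c: c.startswith("chipsetsdk_sp"), "chipset-sdk-sp"),
--         (lambda c: c.startswith("chipsetsdk") and not c.startswith("chipsetsdk_sp"), "chipset-sdk"),
--         (lambda c: c.startswith("passthrough") and not c.startswith("passthrought_indirect"), "passthrough"),
--         (lambda c: c.startswith("passthrought_indirect"), "passthrough/indirect"),
--         (lambda c: c.startswith("platformsdk"), "platformsdk"),
--     ]
--     for pred, result in rules:
--         if any(pred(c) for c in categories):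
--             return result
--     return ""
-- ===== Notes on version B (the rewrite author's own statement) =====
-- stated objective: simpler
-- what changed: Replaces A's seven-flag accumulation pass plus return cascade by a priority-ordered table of (predicate, result) rules scanned for the first rule that some category satisfies.
import Mathlib
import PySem

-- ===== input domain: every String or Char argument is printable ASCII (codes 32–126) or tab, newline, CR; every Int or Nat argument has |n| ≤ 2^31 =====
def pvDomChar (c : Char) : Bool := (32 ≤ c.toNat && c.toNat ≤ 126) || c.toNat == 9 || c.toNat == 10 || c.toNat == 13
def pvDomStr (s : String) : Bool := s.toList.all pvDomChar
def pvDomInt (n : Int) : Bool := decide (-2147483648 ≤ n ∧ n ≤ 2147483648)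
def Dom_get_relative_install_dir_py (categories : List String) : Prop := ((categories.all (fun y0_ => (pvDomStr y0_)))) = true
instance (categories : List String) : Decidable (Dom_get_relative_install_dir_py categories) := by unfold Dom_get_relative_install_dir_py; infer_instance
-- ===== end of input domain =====

-- B replaces A's flag-setting pass plus return cascade by a priority-ordered
-- (predicate, result) rule table scanned for the first rule some category satisfies (objective: simpler).


-- ===== PORT A =====
-- state: (is_platforsdk, is_chipsetsdk, is_chipsetsdk_sp, is_llndk, is_ndk, is_passthrough, is_passthrough_indirect)
def pvAStep (st : Bool × Bool × Bool × Bool × Bool × Bool × Bool) (cat : String) :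
    Bool × Bool × Bool × Bool × Bool × Bool × Bool :=
  let (p, cs, csp, l, n, pt, pti) := st
  let (p, cs, csp, pt, pti) :=
    if PySem.Str.startswith cat "platformsdk" then (true, cs, csp, pt, pti)
    else if PySem.Str.startswith cat "chipsetsdk" then
      (if PySem.Str.startswith cat "chipsetsdk_sp" then (p, cs, true, pt, pti)
       else (p, true, csp, pt, pti))
    else if PySem.Str.startswith cat "passthrough" then
      (if PySem.Str.startswith cat "passthrought_indirect" then (p, cs, csp, pt, true)
       else (p, cs, csp, true, pti))
    else (p, cs, csp, pt, pti)
  let n := if cat == "ndk" then true else n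
  let l := if cat == "llndk" then true else l
  (p, cs, csp, l, n, pt, pti)

def get_relative_install_dir_py (categories : List String) : String :=
  let st := categories.foldl pvAStep (false, false, false, false, false, false, false)
  let (p, cs, csp, l, n, pt, pti) := st
  if l then "llndk"
  else if n then "ndk"
  else if csp then "chipset-sdk-sp"
  else if cs then "chipset-sdk"
  else if pt then "passthrough"
  else if pti then "passthrough/indirect"
  else if p then "platformsdk"
  else ""

-- ===== PORT B =====
def pvRules : List ((String → Bool) × String) :=
  [ (fun c => c == "llndk", "llndk"),
    (fun c => c == "ndk", "ndk"),
    (fun c => PySem.Str.startswith c "chipsetsdk_sp", "chipset-sdk-sp"),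
    (fun c => PySem.Str.startswith c "chipsetsdk" && !PySem.Str.startswith c "chipsetsdk_sp", "chipset-sdk"),
    (fun c => PySem.Str.startswith c "passthrough" && !PySem.Str.startswith c "passthrought_indirect", "passthrough"),
    (fun c => PySem.Str.startswith c "passthrought_indirect", "passthrough/indirect"),
    (fun c => PySem.Str.startswith c "platformsdk", "platformsdk") ]

def get_relative_install_dir_py_alt (categories : List String) : String :=
  match pvRules.find? (fun pr => categories.any pr.1) with
  | some pr => pr.2
  | none => ""

-- ===== PRECONDITION & SPEC =====
def Spec_get_relative_install_dir_py (categories : List String) (out : String) : Prop := out = get_relative_install_dir_py_alt categories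
instance (categories : List String) (out : String) : Decidable (Spec_get_relative_install_dir_py categories out) := by unfold Spec_get_relative_install_dir_py; infer_instance

-- ===== CLAIM (what is proved, stated in full; the proofs are below) =====
def Claim_equal_get_relative_install_dir_py : Prop := ∀ (categories : List String), Dom_get_relative_install_dir_py categories → Spec_get_relative_install_dir_py categories (get_relative_install_dir_py categories)

-- ===== LEMMAS AND PROOFS =====

theorem pv_sw_imp (c p q : String) (h : p.toList <+: q.toList) :
    PySem.Str.startswith c q = true → PySem.Str.startswith c p = true := by
  simp only [PySem.Str.startswith_eq, PySem.Chars.startswith_iff]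
  exact fun hq => h.trans hq

theorem pv_sw_excl (c p q : String) (h1 : ¬ p.toList <+: q.toList) (h2 : ¬ q.toList <+: p.toList) :
    PySem.Str.startswith c q = true → PySem.Str.startswith c p = false := by
  intro hq
  rw [Bool.eq_false_iff]
  intro hp
  rw [PySem.Str.startswith_eq, PySem.Chars.startswith_iff] at hq hp
  rcases List.prefix_or_prefix_of_prefix hp hq with h | h
  · exact h1 h
  · exact h2 h

-- the loop body sets each flag to old ∨ its predicate
set_option maxRecDepth 65536 in
theorem pv_step_eq (st : Bool × Bool × Bool × Bool × Bool × Bool × Bool) (c : String) :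
    pvAStep st c =
      (st.1 || PySem.Str.startswith c "platformsdk",
       st.2.1 || (PySem.Str.startswith c "chipsetsdk" && !PySem.Str.startswith c "chipsetsdk_sp"),
       st.2.2.1 || PySem.Str.startswith c "chipsetsdk_sp",
       st.2.2.2.1 || (c == "llndk"),
       st.2.2.2.2.1 || (c == "ndk"),
       st.2.2.2.2.2.1 || (PySem.Str.startswith c "passthrough" && !PySem.Str.startswith c "passthrought_indirect"),
       st.2.2.2.2.2.2 || PySem.Str.startswith c "passthrought_indirect") := by
  obtain ⟨p, cs, csp, l, n, pt, pti⟩ := st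
  have hA : PySem.Str.startswith c "chipsetsdk_sp" = true → PySem.Str.startswith c "chipsetsdk" = true :=
    pv_sw_imp c "chipsetsdk" "chipsetsdk_sp" (by decide)
  have hB : PySem.Str.startswith c "passthrought_indirect" = true → PySem.Str.startswith c "passthrough" = true :=
    pv_sw_imp c "passthrough" "passthrought_indirect" (by decide)
  have hC : PySem.Str.startswith c "chipsetsdk" = true → PySem.Str.startswith c "platformsdk" = false :=
    pv_sw_excl c "platformsdk" "chipsetsdk" (by decide) (by decide)
  have hD : PySem.Str.startswith c "passthrough" = true → PySem.Str.startswith c "platformsdk" = false :=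
    pv_sw_excl c "platformsdk" "passthrough" (by decide) (by decide)
  have hE : PySem.Str.startswith c "passthrough" = true → PySem.Str.startswith c "chipsetsdk" = false :=
    pv_sw_excl c "chipsetsdk" "passthrough" (by decide) (by decide)
  simp only [pvAStep]
  revert hA hB hC hD hE
  generalize PySem.Str.startswith c "platformsdk" = bpf
  generalize PySem.Str.startswith c "chipsetsdk" = bcs
  generalize PySem.Str.startswith c "chipsetsdk_sp" = bcsp
  generalize PySem.Str.startswith c "passthrough" = bpt
  generalize PySem.Str.startswith c "passthrought_indirect" = bpti
  generalize (c == "llndk") = bl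
  generalize (c == "ndk") = bn
  intro hA hB hC hD hE
  cases bpf <;> cases bcs <;> cases bcsp <;> cases bpt <;> cases bpti <;> cases bl <;> cases bn <;>
    first
      | (exfalso; revert hA hB hC hD hE; decide)
      | simp

-- the whole fold computes 'initial flag ∨ some category satisfies the predicate'
theorem pv_foldl_eq (cats : List String) (st : Bool × Bool × Bool × Bool × Bool × Bool × Bool) :
    cats.foldl pvAStep st =
      (st.1 || cats.any (fun c => PySem.Str.startswith c "platformsdk"),
       st.2.1 || cats.any (fun c => PySem.Str.startswith c "chipsetsdk" && !PySem.Str.startswith c "chipsetsdk_sp"),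
       st.2.2.1 || cats.any (fun c => PySem.Str.startswith c "chipsetsdk_sp"),
       st.2.2.2.1 || cats.any (fun c => c == "llndk"),
       st.2.2.2.2.1 || cats.any (fun c => c == "ndk"),
       st.2.2.2.2.2.1 || cats.any (fun c => PySem.Str.startswith c "passthrough" && !PySem.Str.startswith c "passthrought_indirect"),
       st.2.2.2.2.2.2 || cats.any (fun c => PySem.Str.startswith c "passthrought_indirect")) := by
  induction cats generalizing st with
  | nil => simp
  | cons c rest ih =>
    simp only [List.foldl_cons, List.any_cons]
    rw [pv_step_eq, ih]
    obtain ⟨p, cs, csp, l, n, pt, pti⟩ := st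
    simp [Bool.or_assoc]

-- ===== VERDICT (by name: the statement is the Claim_ definition above) =====
set_option maxHeartbeats 1000000 in
theorem get_relative_install_dir_py_spec : Claim_equal_get_relative_install_dir_py := by
  intro categories _
  unfold Spec_get_relative_install_dir_py
  unfold get_relative_install_dir_py get_relative_install_dir_py_alt pvRules
  rw [pv_foldl_eq]
  simp only [List.find?, Bool.false_or]
  cases hl : categories.any (fun c => c == "llndk") <;>
    cases hn : categories.any (fun c => c == "ndk") <;>
      cases hcsp : categories.any (fun c => PySem.Str.startswith c "chipsetsdk_sp") <;>
        cases hcs : categories.any (fun c => PySem.Str.startswith c "chipsetsdk" && !PySem.Str.startswith c "chipsetsdk_sp") <;>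
          cases hpt : categories.any (fun c => PySem.Str.startswith c "passthrough" && !PySem.Str.startswith c "passthrought_indirect") <;>
            cases hpti : categories.any (fun c => PySem.Str.startswith c "passthrought_indirect") <;>
              cases hp : categories.any (fun c => PySem.Str.startswith c "platformsdk") <;>
                rfl
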